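-- pv_equiv track=rewrite | github.com/jigglypop/- | 04/0427/후보키.py | solution
-- ===== SOURCE A (Python) =====
-- from itertools import chain, combinations
--
-- def get_all_subset(iterable):
--     s = list(iterable)
--     d = chain.from_iterable(combinations(iterable, r)
--                             for r in range(len(iterable) + 1))
--     return d
--
-- def solution(relation):
--     answer_list = []
--     subset_list = get_all_subset(list(range(0, len(relation[0]))))
--     unique_list = []
--     for subset in subset_list:
--         unique = True
--         row_set = set()
--         for row in range(len(relation)):
--             data = ''
--             for column in subset:
--                 data += relation[row][column] + '.'
--             if data in row_set:
--                 unique = False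
--                 break
--             row_set.add(data)
--
--         if unique:
--             unique_list.append(subset)
--
--     unique_list = sorted(unique_list, key=lambda x: len(x))
--
--     for subset in unique_list:
--         subset = set(subset)
--         check = True
--         for j in answer_list:
--             if j.issubset(subset):
--                 check = False
--         if check == True:
--             answer_list.append(subset)
--     return len(answer_list)
-- ===== SOURCE B (Python) =====
-- from itertools import combinations
--
-- def solution(relation):
--     n = len(relation[0])
--     def is_unique(cols):
--         keys = sorted(''.join(relation[r][c] + '.' for c in cols) for r in range(len(relation)))
--         return all(x != y for x, y in zip(keys, keys[1:]))
--     has_unique = {}   # cols -> some subset of cols (maybe cols itself) is unique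
--     count = 0
--     for r in range(n + 1):
--         for cols in combinations(range(n), r):
--             u = is_unique(cols)
--             sub = any(has_unique[tuple(c for c in cols if c != i)] for i in cols)
--             has_unique[cols] = u or sub
--             if u and not sub:
--                 count += 1
--     return count
-- ===== Notes on version B (the rewrite author's own statement) =====
-- stated objective: alternative
-- what changed: B replaces A's sort-by-size pass plus greedy filtering against an accumulated answer list by a single size-ordered dynamic-programming sweep: a dict has_unique[cols] memoizes whether some subset of cols is a key (computed from the entries for cols minus one column), and a subset is counted exactly when it is unique and no one-column-removed subset already contains a key; uniqueness itself is decided by sorting the row keys and scanning adjacent pairs instead of A's early-breaking hash-set loop.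
-- outside the precondition, e.g. on solution([['a'], ['a'], []]): A returns 0, B raises IndexError
import Mathlib
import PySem

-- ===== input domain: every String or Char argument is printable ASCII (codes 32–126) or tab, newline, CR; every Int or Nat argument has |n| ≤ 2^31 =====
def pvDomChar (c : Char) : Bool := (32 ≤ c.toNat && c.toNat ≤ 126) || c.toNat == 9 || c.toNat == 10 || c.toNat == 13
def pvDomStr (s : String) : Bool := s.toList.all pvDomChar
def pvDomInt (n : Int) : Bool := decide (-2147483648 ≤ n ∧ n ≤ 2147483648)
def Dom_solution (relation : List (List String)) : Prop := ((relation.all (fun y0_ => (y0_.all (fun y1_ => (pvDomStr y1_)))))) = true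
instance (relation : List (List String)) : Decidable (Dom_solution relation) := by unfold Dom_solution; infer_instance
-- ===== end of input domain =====

-- B replaces A's sort-by-size plus greedy accept-list pass by one size-ordered dynamic-programming
-- sweep memoizing "some subset of these columns is a key" in a dict (objective: alternative).
-- Equivalence is about the return value; neither program mutates its argument.

-- ===== PORT A =====
-- itertools.combinations / the subset enumeration of get_all_subset (shared library port)
def pvAllSubsets (n : Nat) : List (List Int) :=
  (List.range (n + 1)).flatMap (fun r => PySem.List.combinations (PySem.List.pyRange 0 (n : Int) 1) r)

-- the string key A accumulates: data += relation[row][column] + '.'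
def pvKeyA (relation : List (List String)) (subset : List Int) (row : Int) : String :=
  subset.foldl (fun data column =>
    data ++ PySem.List.pyGetD (PySem.List.pyGetD relation row []) column "" ++ ".") ""

-- A's inner row loop with its early break on a repeated key
def pvUniqueRowsA (relation : List (List String)) (subset : List Int) :
    List Int → PySem.Set String → Bool
  | [], _ => true
  | row :: rest, rowSet =>
    let data := pvKeyA relation subset row
    if rowSet.contains data then false
    else pvUniqueRowsA relation subset rest (rowSet.add data)

def solution (relation : List (List String)) : Int :=
  let subsetList := pvAllSubsets (PySem.List.pyGetD relation 0 []).length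
  let uniqueList := subsetList.foldl (fun acc subset =>
    if pvUniqueRowsA relation subset (PySem.List.pyRange 0 (relation.length : Int) 1)
        PySem.Set.empty then acc ++ [subset] else acc) []
  let uniqueSorted := PySem.List.sorted uniqueList (fun x => (x.length : Int))
  let answerList := uniqueSorted.foldl (fun acc subset =>
    let sset : PySem.Set Int := PySem.Set.ofList subset
    let check := acc.foldl (fun ch j => if PySem.Set.issubset j sset then false else ch) true
    if check then acc ++ [sset] else acc) ([] : List (PySem.Set Int))
  (answerList.length : Int)

-- ===== PORT B =====
-- the key B builds: ''.join(relation[r][c] + '.' for c in cols)  (columns of cols in increasing order, as in A)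
def pvKeyB (relation : List (List String)) (cols : List Int) (row : Int) : String :=
  PySem.Str.join "" (cols.map (fun c =>
    PySem.List.pyGetD (PySem.List.pyGetD relation row []) c "" ++ "."))

-- is_unique: sort the row keys, then no adjacent pair is equal (keys[1:] ported as .tail)
def pvIsUniqueB (relation : List (List String)) (cols : List Int) : Bool :=
  let keys := PySem.List.sorted
    ((PySem.List.pyRange 0 (relation.length : Int) 1).map (pvKeyB relation cols)) (fun s => s) false
  (keys.zip keys.tail).all (fun p => p.1 != p.2)

-- B's single DP sweep; the dict lookup has_unique[...] is ported with getD false — the key is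
-- always present (the one-column-removed tuple was processed in an earlier, smaller size), so the
-- KeyError branch of the Python subscript is unreachable and the port is exact.
-- the body of B's inner loop: one DP step over the (dict, count) state
def pvStepB (relation : List (List String)) (st : PySem.Dict (List Int) Bool × Int)
    (cols : List Int) : PySem.Dict (List Int) Bool × Int :=
  let u := pvIsUniqueB relation cols
  let sub := cols.any (fun i => PySem.Dict.getD st.1 (cols.filter (fun c => c != i)) false)
  (PySem.Dict.insert st.1 cols (u || sub), if u && !sub then st.2 + 1 else st.2)

def solution_alt (relation : List (List String)) : Int :=
  let n := (PySem.List.pyGetD relation 0 []).length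
  ((List.range (n + 1)).foldl (fun st r =>
    (PySem.List.combinations (PySem.List.pyRange 0 (n : Int) 1) r).foldl (pvStepB relation) st)
    ((PySem.Dict.empty : PySem.Dict (List Int) Bool), (0 : Int))).2

-- ===== PRECONDITION & SPEC =====
-- Pre_ excludes the empty relation (A raises IndexError on relation[0]) and ragged relations in
-- which some row is shorter than the first row: there A normally raises IndexError as well, and in
-- the rare case where A's early break on a duplicate key skips the short row and A still returns,
-- that return is an artefact of the break order and B raises IndexError.
def Pre_solution (relation : List (List String)) : Prop :=
  relation ≠ [] ∧ ∀ row ∈ relation, (relation.headI).length ≤ row.length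
instance (relation : List (List String)) : Decidable (Pre_solution relation) := by
  unfold Pre_solution; infer_instance

def pvWitness_solution : List (List String) := [["a", "b"], ["a", "c"]]

def Spec_solution (relation : List (List String)) (out : Int) : Prop := out = solution_alt relation
instance (relation : List (List String)) (out : Int) : Decidable (Spec_solution relation out) := by
  unfold Spec_solution; infer_instance

-- ===== CLAIM (what is proved, stated in full; the proofs are below) =====
def Claim_equal_solution : Prop := ∀ (relation : List (List String)),
  Dom_solution relation → Pre_solution relation → Spec_solution relation (solution relation)

-- ===== LEMMAS AND PROOFS =====

theorem pv_chars_join_nil (l : List (List Char)) : PySem.Chars.join [] l = l.flatten := by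
  induction l with
  | nil => rfl
  | cons a t ih =>
    cases t with
    | nil => simp [PySem.Chars.join, List.intercalate]
    | cons b t2 =>
      simp only [PySem.Chars.join, List.intercalate, List.intersperse] at *
      simp_all

theorem pv_str_toList_inj {s t : String} (h : s.toList = t.toList) : s = t := by
  have := congrArg String.ofList h
  simpa [String.ofList_toList] using this

theorem pv_join_empty_nil : PySem.Str.join "" [] = "" := rfl

theorem pv_join_empty_cons (s : String) (parts : List String) :
    PySem.Str.join "" (s :: parts) = s ++ PySem.Str.join "" parts := by
  apply pv_str_toList_inj
  simp [PySem.Str.join, pv_chars_join_nil, String.toList_append, String.toList_ofList]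

theorem pv_foldl_append_eq_join (f : Int → String) :
    ∀ (l : List Int) (d : String),
      l.foldl (fun a c => a ++ f c ++ ".") d = d ++ PySem.Str.join "" (l.map (fun c => f c ++ ".")) := by
  intro l
  induction l with
  | nil => intro d; simp [pv_join_empty_nil, String.append_empty]
  | cons c t ih =>
    intro d
    simp only [List.foldl_cons, List.map_cons, pv_join_empty_cons]
    rw [ih]
    rw [String.append_assoc, String.append_assoc, String.append_assoc]

theorem pv_key_eq (relation : List (List String)) (subset : List Int) (row : Int) :
    pvKeyA relation subset row = pvKeyB relation subset row := by
  unfold pvKeyA pvKeyB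
  rw [pv_foldl_append_eq_join]
  simp

theorem pv_uniqueA_iff (relation : List (List String)) (subset : List Int) :
    ∀ (rows : List Int) (seen : PySem.Set String),
      pvUniqueRowsA relation subset rows seen = true ↔
        ((rows.map (pvKeyA relation subset)).Nodup ∧
          ∀ r ∈ rows, pvKeyA relation subset r ∉ seen) := by
  intro rows
  induction rows with
  | nil => intro seen; simp [pvUniqueRowsA]
  | cons row rest ih =>
    intro seen
    simp only [pvUniqueRowsA, List.map_cons, List.nodup_cons]
    by_cases hc : seen.contains (pvKeyA relation subset row) = true
    · rw [PySem.Set.contains_iff] at hc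
      rw [if_pos (by rw [PySem.Set.contains_iff]; exact hc)]
      constructor
      · intro h; simp at h
      · rintro ⟨-, h2⟩; exact absurd hc (h2 row (List.mem_cons_self))
    · have hnm : pvKeyA relation subset row ∉ seen := fun h => hc ((PySem.Set.contains_iff _ _).mpr h)
      rw [if_neg hc, ih]
      constructor
      · rintro ⟨hnd, hmem⟩
        refine ⟨⟨fun hin => ?_, hnd⟩, fun r hr => ?_⟩
        · rw [List.mem_map] at hin
          obtain ⟨r, hr, he⟩ := hin
          have := hmem r hr
          rw [PySem.Set.mem_add] at this
          exact this (Or.inr he)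
        · rw [List.mem_cons] at hr
          rcases hr with rfl | hr
          · exact hnm
          · intro hs
            have := hmem r hr
            rw [PySem.Set.mem_add] at this
            exact this (Or.inl hs)
      · rintro ⟨⟨hnin, hnd⟩, hmem⟩
        refine ⟨hnd, fun r hr hadd => ?_⟩
        rw [PySem.Set.mem_add] at hadd
        rcases hadd with h | h
        · exact hmem r (List.mem_cons_of_mem _ hr) h
        · exact hnin (List.mem_map.mpr ⟨r, hr, h⟩)

-- sorted-then-adjacent-distinct decides Nodup (B's is_unique test)
theorem pv_adj_ne_iff_nodup :
    ∀ (l : List String), l.Pairwise (· ≤ ·) →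
      (((l.zip l.tail).all (fun p => p.1 != p.2)) = true ↔ l.Nodup) := by
  intro l
  induction l with
  | nil => intro _; simp
  | cons a t ih =>
    intro hp
    rw [List.pairwise_cons] at hp
    cases t with
    | nil => simp
    | cons b t2 =>
      have iht := ih hp.2
      simp only [List.zip, List.tail, List.zipWith, List.all_cons, Bool.and_eq_true,
        List.nodup_cons] at *
      constructor
      · rintro ⟨hab, hrest⟩
        have hnd := iht.mp hrest
        refine ⟨?_, hnd⟩
        intro hmem
        rw [List.mem_cons] at hmem
        rcases hmem with rfl | hmem
        · simp at hab
        · have hp2 := hp.2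
          rw [List.pairwise_cons] at hp2
          have hb2 : b ≤ a := hp2.1 a hmem
          have hab' : a ≤ b := hp.1 b (List.mem_cons_self)
          have : a = b := le_antisymm hab' hb2
          rw [this] at hab; simp at hab
      · rintro ⟨hnin, hnd⟩
        refine ⟨?_, iht.mpr hnd⟩
        simp only [bne_iff_ne, ne_eq]
        intro h; exact hnin (h ▸ List.mem_cons_self)

theorem pv_not_mem_empty {α : Type} [BEq α] (x : α) : x ∉ (PySem.Set.empty : PySem.Set α) := by
  simp [PySem.Set.empty]

-- B's sorted-adjacent uniqueness test agrees with A's early-breaking row loop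
theorem pv_pred_eq (relation : List (List String)) (subset : List Int) :
    pvUniqueRowsA relation subset (PySem.List.pyRange 0 (relation.length : Int) 1)
      PySem.Set.empty = pvIsUniqueB relation subset := by
  rw [Bool.eq_iff_iff, pv_uniqueA_iff]
  unfold pvIsUniqueB
  have hkey : (PySem.List.pyRange 0 (relation.length : Int) 1).map (pvKeyB relation subset)
      = (PySem.List.pyRange 0 (relation.length : Int) 1).map (pvKeyA relation subset) :=
    List.map_congr_left (fun r _ => (pv_key_eq relation subset r).symm)
  rw [hkey]
  set keys := (PySem.List.pyRange 0 (relation.length : Int) 1).map (pvKeyA relation subset)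
  have hsp : (PySem.List.sorted keys (fun s => s) false).Perm keys :=
    PySem.List.sorted_perm keys (fun s => s) false
  have hpw : (PySem.List.sorted keys (fun s => s) false).Pairwise (· ≤ ·) :=
    PySem.List.sorted_pairwise keys (fun s => s)
  rw [pv_adj_ne_iff_nodup _ hpw, hsp.nodup_iff]
  constructor
  · rintro ⟨hnd, -⟩; exact hnd
  · intro h; exact ⟨h, fun r _ => pv_not_mem_empty _⟩

theorem pv_ofList_eq_self_of_nodup {α : Type} [BEq α] [LawfulBEq α] {xs : List α}
    (h : xs.Nodup) : PySem.Set.ofList xs = xs := by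
  induction xs with
  | nil => rfl
  | cons x t ih =>
    rw [List.nodup_cons] at h
    rw [PySem.Set.ofList_cons, ih h.2]
    congr 1
    show List.filter _ t = t
    rw [List.filter_eq_self]
    intro a ha
    simp only [Bool.not_eq_eq_eq_not, Bool.not_true, beq_eq_false_iff_ne, ne_eq]
    exact fun he => h.1 (he ▸ ha)

theorem pv_nodup_combinations {α : Type} {xs : List α} (h : xs.Nodup) :
    ∀ r, (PySem.List.combinations xs r).Nodup := by
  induction xs with
  | nil =>
    intro r
    cases r with
    | zero => simp [PySem.List.combinations_zero]
    | succ r => simp [PySem.List.combinations_nil_succ]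
  | cons x t ih =>
    intro r
    rw [List.nodup_cons] at h
    cases r with
    | zero => simp [PySem.List.combinations_zero]
    | succ r =>
      rw [PySem.List.combinations_cons_succ]
      apply List.Nodup.append
      · exact (ih h.2 r).map (fun a b hab => by injection hab)
      · exact ih h.2 (r + 1)
      · intro c hc1 hc2
        rw [List.mem_map] at hc1
        obtain ⟨c', _, rfl⟩ := hc1
        have hsub := PySem.List.sublist_of_mem_combinations hc2
        exact h.1 (hsub.mem (List.mem_cons_self))

theorem pv_allSubsets_sublist {n : Nat} {c : List Int} (h : c ∈ pvAllSubsets n) :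
    c.Sublist (PySem.List.pyRange 0 (n : Int) 1) := by
  unfold pvAllSubsets at h
  rw [List.mem_flatMap] at h
  obtain ⟨r, _, hc⟩ := h
  exact PySem.List.sublist_of_mem_combinations hc

theorem pv_mem_allSubsets_of_sublist {n : Nat} {c : List Int}
    (h : c.Sublist (PySem.List.pyRange 0 (n : Int) 1)) : c ∈ pvAllSubsets n := by
  unfold pvAllSubsets
  rw [List.mem_flatMap]
  refine ⟨c.length, List.mem_range.mpr ?_, (PySem.List.mem_combinations_iff _ _ _).mpr ⟨h, rfl⟩⟩
  have := h.length_le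
  rw [PySem.List.length_pyRange_one] at this
  omega

theorem pv_allSubsets_elem_sorted {n : Nat} {c : List Int} (h : c ∈ pvAllSubsets n) :
    c.Pairwise (· < ·) :=
  List.Pairwise.sublist (pv_allSubsets_sublist h) (PySem.List.pairwise_lt_pyRange_one 0 (n : Int))

theorem pv_allSubsets_pairwise_len (n : Nat) :
    (pvAllSubsets n).Pairwise (fun a b => a.length ≤ b.length) := by
  unfold pvAllSubsets
  rw [List.pairwise_flatMap]
  constructor
  · intro r _
    apply List.pairwise_of_forall_mem_list
    intro a ha b hb
    rw [PySem.List.length_of_mem_combinations ha, PySem.List.length_of_mem_combinations hb]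
  · refine List.Pairwise.imp ?_ List.pairwise_lt_range
    intro r1 r2 hlt x hx y hy
    rw [PySem.List.length_of_mem_combinations hx, PySem.List.length_of_mem_combinations hy]
    exact le_of_lt hlt

theorem pv_allSubsets_nodup (n : Nat) : (pvAllSubsets n).Nodup := by
  unfold pvAllSubsets
  rw [List.Nodup, List.pairwise_flatMap]
  constructor
  · intro r _
    exact pv_nodup_combinations (PySem.List.nodup_pyRange_one 0 (n : Int)) r
  · refine List.Pairwise.imp ?_ List.pairwise_lt_range
    intro r1 r2 hlt x hx y hy he
    rw [he] at hx
    have h1 := PySem.List.length_of_mem_combinations hx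
    have h2 := PySem.List.length_of_mem_combinations hy
    omega

theorem pv_eq_of_sorted_subsets {a b : List Int} (ha : a.Pairwise (· < ·))
    (hb : b.Pairwise (· < ·)) (h1 : a ⊆ b) (h2 : b ⊆ a) : a = b := by
  have hna : a.Nodup := ha.imp (fun h => ne_of_lt h)
  have hnb : b.Nodup := hb.imp (fun h => ne_of_lt h)
  have sp1 := hna.subperm h1
  have sp2 := hnb.subperm h2
  have hperm := sp1.perm_of_length_le sp2.length_le
  exact List.Perm.eq_of_pairwise (fun x y _ _ hxy hyx => absurd hyx (lt_asymm hxy)) ha hb hperm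

theorem pv_len_lt_of_ssubset {a b : List Int} (ha : a.Pairwise (· < ·))
    (h1 : a ⊆ b) (h2 : ¬ b ⊆ a) : a.length < b.length := by
  have hna : a.Nodup := ha.imp (fun h => ne_of_lt h)
  have sp1 := hna.subperm h1
  rcases lt_or_eq_of_le sp1.length_le with h | h
  · exact h
  · exact absurd (fun x hx => ((sp1.perm_of_length_le (le_of_eq h.symm)).mem_iff).mpr hx) h2

-- ---- A's second loop (sort by size, then greedy filter against the accepted list) ----

-- minimality: no other accepted/unique subset is strictly below s
def pvMinB (M : List (List Int)) (s : List Int) : Bool :=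
  !(M.any (fun u => PySem.Set.issubset u s && !PySem.Set.issubset s u))

def pvBody (acc : List (List Int)) (s : List Int) : List (List Int) :=
  if (!acc.any (fun j => PySem.Set.issubset j s)) then acc ++ [s] else acc

theorem pv_exists_min (M : List (List Int)) (hsor : ∀ c ∈ M, c.Pairwise (· < ·))
    (s : List Int) :
    ∀ (k : Nat) (u : List Int), u ∈ M → u.length ≤ k → u ⊆ s → ¬ s ⊆ u →
      ∃ w ∈ M, w ⊆ s ∧ ¬ s ⊆ w ∧ pvMinB M w = true := by
  intro k
  induction k with
  | zero =>
    intro u hu hk h1 h2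
    by_cases hmin : pvMinB M u = true
    · exact ⟨u, hu, h1, h2, hmin⟩
    · exfalso
      have hany : (M.any fun v => PySem.Set.issubset v u && !PySem.Set.issubset u v) = true := by
        cases hb : (M.any fun v => PySem.Set.issubset v u && !PySem.Set.issubset u v) with
        | true => rfl
        | false => exact absurd (by simp [pvMinB, hb]) hmin
      rw [List.any_eq_true] at hany
      obtain ⟨v, hv, hvb⟩ := hany
      rw [Bool.and_eq_true] at hvb
      have hvu : v ⊆ u := (PySem.Set.issubset_iff v u).mp hvb.1
      have huv : ¬ u ⊆ v := fun h => by
        have h2x := (PySem.Set.issubset_iff u v).mpr h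
        rw [h2x] at hvb
        simp at hvb
      have := pv_len_lt_of_ssubset (hsor v hv) hvu huv
      omega
  | succ k ih =>
    intro u hu hk h1 h2
    by_cases hmin : pvMinB M u = true
    · exact ⟨u, hu, h1, h2, hmin⟩
    ·
      have hany : (M.any fun v => PySem.Set.issubset v u && !PySem.Set.issubset u v) = true := by
        cases hb : (M.any fun v => PySem.Set.issubset v u && !PySem.Set.issubset u v) with
        | true => rfl
        | false => exact absurd (by simp [pvMinB, hb]) hmin
      rw [List.any_eq_true] at hany
      obtain ⟨v, hv, hvb⟩ := hany
      rw [Bool.and_eq_true] at hvb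
      have hvu : v ⊆ u := (PySem.Set.issubset_iff v u).mp hvb.1
      have huv : ¬ u ⊆ v := fun h => by
        have h2x := (PySem.Set.issubset_iff u v).mpr h
        rw [h2x] at hvb
        simp at hvb
      have hlt := pv_len_lt_of_ssubset (hsor v hv) hvu huv
      exact ih v hv (by omega) (fun x hx => h1 (hvu hx))
        (fun h => h2 (fun x hx => hvu (h hx)))

theorem pv_accept_iff (M pre rest : List (List Int)) (s : List Int)
    (hM : M = pre ++ s :: rest)
    (hlen : M.Pairwise (fun a b => a.length ≤ b.length)) (hnd : M.Nodup)
    (hsor : ∀ c ∈ M, c.Pairwise (· < ·)) :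
    (!((pre.filter (pvMinB M)).any (fun j => PySem.Set.issubset j s))) = pvMinB M s := by
  have hsmem : s ∈ M := by rw [hM]; exact List.mem_append_right _ (List.mem_cons_self)
  unfold pvMinB
  rw [Bool.eq_iff_iff, Bool.not_eq_true', Bool.not_eq_true', ← Bool.not_eq_true, ← Bool.not_eq_true]
  apply not_congr
  rw [List.any_eq_true, List.any_eq_true]
  constructor
  · rintro ⟨j, hj, hjs⟩
    rw [List.mem_filter] at hj
    refine ⟨j, by rw [hM]; exact List.mem_append_left _ hj.1, ?_⟩
    rw [Bool.and_eq_true]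
    refine ⟨hjs, ?_⟩
    rw [Bool.not_eq_true']
    by_contra hne
    have hsj : s ⊆ j := (PySem.Set.issubset_iff s j).mp (by
      cases hb : PySem.Set.issubset s j
      · exact absurd hb hne
      · rfl)
    have hjs' : j ⊆ s := (PySem.Set.issubset_iff j s).mp hjs
    have hjmem : j ∈ M := by rw [hM]; exact List.mem_append_left _ hj.1
    have : j = s := pv_eq_of_sorted_subsets (hsor j hjmem) (hsor s hsmem) hjs' hsj
    subst this
    rw [hM, List.nodup_append] at hnd
    exact hnd.2.2 _ hj.1 _ (List.mem_cons_self) rfl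
  · rintro ⟨u, hu, hub⟩
    rw [Bool.and_eq_true] at hub
    have hus : u ⊆ s := (PySem.Set.issubset_iff u s).mp hub.1
    have hsu : ¬ s ⊆ u := fun h => by
      have hx := (PySem.Set.issubset_iff s u).mpr h
      rw [hx] at hub; simp at hub
    obtain ⟨w, hw, hws, hsw, hwmin⟩ := pv_exists_min M hsor s u.length u hu le_rfl hus hsu
    refine ⟨w, ?_, ?_⟩
    · rw [List.mem_filter]
      refine ⟨?_, hwmin⟩
      have hwlen : w.length < s.length :=
        pv_len_lt_of_ssubset (hsor w hw) hws hsw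
      rw [hM] at hw
      rcases List.mem_append.mp hw with h | h
      · exact h
      · exfalso
        rcases List.mem_cons.mp h with rfl | h
        · exact hsw (fun x hx => hx)
        · rw [hM] at hlen
          have := (List.pairwise_append.mp hlen).2.1
          rw [List.pairwise_cons] at this
          have := this.1 w h
          omega
    · exact (PySem.Set.issubset_iff w s).mpr hws

theorem pv_greedy_aux (M : List (List Int))
    (hlen : M.Pairwise (fun a b => a.length ≤ b.length)) (hnd : M.Nodup)
    (hsor : ∀ c ∈ M, c.Pairwise (· < ·)) :
    ∀ (rest pre : List (List Int)), M = pre ++ rest →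
      rest.foldl pvBody (pre.filter (pvMinB M)) = M.filter (pvMinB M) := by
  intro rest
  induction rest with
  | nil =>
    intro pre hM
    rw [List.append_nil] at hM
    subst hM
    rfl
  | cons s rest ih =>
    intro pre hM
    rw [List.foldl_cons]
    have hacc : pvBody (pre.filter (pvMinB M)) s = (pre ++ [s]).filter (pvMinB M) := by
      unfold pvBody
      rw [pv_accept_iff M pre rest s hM hlen hnd hsor, List.filter_append]
      cases h : pvMinB M s with
      | true => rw [if_pos rfl]; rw [show (List.filter (pvMinB M) [s]) = [s] from by simp [h]]
      | false => rw [if_neg (by simp)]; rw [show (List.filter (pvMinB M) [s]) = [] from by simp [h], List.append_nil]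
    rw [hacc]
    exact ih (pre ++ [s]) (by rw [hM, List.append_assoc]; rfl)

theorem pv_greedy_eq (M : List (List Int))
    (hlen : M.Pairwise (fun a b => a.length ≤ b.length)) (hnd : M.Nodup)
    (hsor : ∀ c ∈ M, c.Pairwise (· < ·)) :
    M.foldl pvBody [] = M.filter (pvMinB M) :=
  pv_greedy_aux M hlen hnd hsor M [] rfl

-- A's whole program computes the size-sorted minimal filter
theorem pv_A_eq (relation : List (List String)) :
    solution relation =
      (((pvAllSubsets (PySem.List.pyGetD relation 0 []).length).filter
          (pvIsUniqueB relation)).filter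
        (pvMinB ((pvAllSubsets (PySem.List.pyGetD relation 0 []).length).filter
          (pvIsUniqueB relation)))).length := by
  simp only [solution]
  set n := (PySem.List.pyGetD relation 0 []).length with hn
  set S := pvAllSubsets n with hS
  rw [PySem.List.foldl_append_if_eq_filter
    (fun subset => pvUniqueRowsA relation subset (PySem.List.pyRange 0 (relation.length : Int) 1)
      PySem.Set.empty) S []]
  rw [List.nil_append]
  rw [List.filter_congr (fun subset _ => pv_pred_eq relation subset)]
  set M := S.filter (pvIsUniqueB relation) with hM
  have hMsub : ∀ c ∈ M, c ∈ S := fun c hc => (List.mem_filter.mp hc).1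
  have hMsor : ∀ c ∈ M, c.Pairwise (· < ·) := fun c hc => pv_allSubsets_elem_sorted (hMsub c hc)
  have hMlen : M.Pairwise (fun a b => a.length ≤ b.length) :=
    (pv_allSubsets_pairwise_len n).filter _
  have hMnd : M.Nodup := (pv_allSubsets_nodup n).filter _
  rw [PySem.List.sorted_eq_self_of_pairwise M (fun x => (x.length : Int))
    (hMlen.imp (fun h => by simpa using h))]
  have hbody : M.foldl (fun acc subset =>
      let sset : PySem.Set Int := PySem.Set.ofList subset
      let check := acc.foldl (fun ch j => if PySem.Set.issubset j sset then false else ch) true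
      if check then acc ++ [sset] else acc) [] = M.foldl pvBody [] := by
    apply PySem.List.foldl_congr_mem
    intro acc subset hmem
    have hid : PySem.Set.ofList subset = subset :=
      pv_ofList_eq_self_of_nodup ((hMsor subset hmem).imp (fun h => ne_of_lt h))
    simp only [hid, PySem.List.foldl_if_false_eq, Bool.true_and, pvBody]
  rw [hbody, pv_greedy_eq M hMlen hMnd hMsor]

-- ---- B's DP sweep ----

-- "some subset of s (possibly s itself) is unique": the value B's dict holds at s
def pvG (relation : List (List String)) (n : Nat) (s : List Int) : Bool :=
  (pvAllSubsets n).any (fun t => PySem.Set.issubset t s && pvIsUniqueB relation t)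

def pvDrop (relation : List (List String)) (n : Nat) (s : List Int) : Bool :=
  s.any (fun i => pvG relation n (s.filter (fun c => c != i)))

def pvGood (relation : List (List String)) (n : Nat) (s : List Int) : Bool :=
  pvIsUniqueB relation s && !pvDrop relation n s

def pvDictOf (relation : List (List String)) (n : Nat) (P : List (List Int)) :
    PySem.Dict (List Int) Bool :=
  P.foldl (fun d s => d.insert s (pvG relation n s)) PySem.Dict.empty

theorem pv_getD_dictOf (relation : List (List String)) (n : Nat) :
    ∀ (P : List (List Int)) (t : List Int),
      (pvDictOf relation n P).getD t false = if t ∈ P then pvG relation n t else false := by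
  intro P
  induction P using List.reverseRecOn with
  | nil => intro t; simp [pvDictOf, PySem.Dict.getD_empty]
  | append_singleton P s ih =>
    intro t
    unfold pvDictOf at *
    rw [List.foldl_append, List.foldl_cons, List.foldl_nil, PySem.Dict.getD_insert]
    by_cases hts : t = s
    · subst hts; simp
    · rw [if_neg hts, ih t]
      simp [List.mem_append, hts]

theorem pv_filter_ne_length_lt {s : List Int} {i : Int} (h : i ∈ s) :
    (s.filter (fun c => c != i)).length < s.length := by
  refine lt_of_le_of_ne (List.length_filter_le _ _) (fun he => ?_)
  have heq : s.filter (fun c => c != i) = s := (List.filter_sublist (l := s)).eq_of_length he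
  have : i ∈ s.filter (fun c => c != i) := by rw [heq]; exact h
  rw [List.mem_filter] at this
  simp at this

theorem pv_filter_ne_mem_allSubsets {n : Nat} {s : List Int} (hs : s ∈ pvAllSubsets n)
    (i : Int) : s.filter (fun c => c != i) ∈ pvAllSubsets n :=
  pv_mem_allSubsets_of_sublist ((List.filter_sublist (l := s)).trans (pv_allSubsets_sublist hs))

-- the value B inserts equals the canonical dict value
theorem pv_g_step (relation : List (List String)) {n : Nat} {s : List Int}
    (hs : s ∈ pvAllSubsets n) :
    (pvIsUniqueB relation s || pvDrop relation n s) = pvG relation n s := by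
  rw [Bool.eq_iff_iff, Bool.or_eq_true]
  unfold pvG pvDrop
  constructor
  · rintro (hu | hd)
    · rw [List.any_eq_true]
      exact ⟨s, hs, by
        rw [Bool.and_eq_true]
        exact ⟨(PySem.Set.issubset_iff s s).mpr (fun x hx => hx), hu⟩⟩
    · rw [List.any_eq_true] at hd
      obtain ⟨i, hi, hgi⟩ := hd
      unfold pvG at hgi
      rw [List.any_eq_true] at hgi ⊢
      obtain ⟨t, ht, htb⟩ := hgi
      rw [Bool.and_eq_true] at htb
      refine ⟨t, ht, ?_⟩
      rw [Bool.and_eq_true]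
      refine ⟨?_, htb.2⟩
      rw [PySem.Set.issubset_iff] at htb ⊢
      intro x hx
      exact (List.mem_filter.mp (htb.1 x hx)).1
  · intro hg
    rw [List.any_eq_true] at hg
    obtain ⟨t, ht, htb⟩ := hg
    rw [Bool.and_eq_true] at htb
    by_cases hts : t = s
    · exact Or.inl (hts ▸ htb.2)
    · refine Or.inr ?_
      have hsub : t ⊆ s := (PySem.Set.issubset_iff t s).mp htb.1
      have hns : ¬ s ⊆ t := fun hst =>
        hts (pv_eq_of_sorted_subsets (pv_allSubsets_elem_sorted ht)
          (pv_allSubsets_elem_sorted hs) hsub hst)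
      have hex : ∃ i, i ∈ s ∧ i ∉ t := by
        by_contra hc
        push Not at hc
        exact hns (fun x hx => hc x hx)
      obtain ⟨i, hi, hit⟩ := hex
      rw [List.any_eq_true]
      refine ⟨i, hi, ?_⟩
      unfold pvG
      rw [List.any_eq_true]
      refine ⟨t, ht, ?_⟩
      rw [Bool.and_eq_true]
      refine ⟨?_, htb.2⟩
      rw [PySem.Set.issubset_iff]
      intro x hx
      rw [List.mem_filter]
      refine ⟨hsub hx, ?_⟩
      simp only [bne_iff_ne, ne_eq]
      exact fun he => hit (he ▸ hx)

-- B's minimality test (no unique one-column-removed superset-closure) is A's greedy minimality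
theorem pv_drop_any (relation : List (List String)) {n : Nat} {s : List Int} :
    pvDrop relation n s =
      ((pvAllSubsets n).filter (pvIsUniqueB relation)).any
        (fun u => PySem.Set.issubset u s && !PySem.Set.issubset s u) := by
  rw [Bool.eq_iff_iff]
  unfold pvDrop
  rw [List.any_eq_true, List.any_eq_true]
  constructor
  · rintro ⟨i, hi, hgi⟩
    unfold pvG at hgi
    rw [List.any_eq_true] at hgi
    obtain ⟨t, ht, htb⟩ := hgi
    rw [Bool.and_eq_true] at htb
    have htf : t ⊆ s.filter (fun c => c != i) := (PySem.Set.issubset_iff _ _).mp htb.1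
    have hit : i ∉ t := fun hin => by
      have := List.mem_filter.mp (htf hin)
      simp at this
    refine ⟨t, List.mem_filter.mpr ⟨ht, htb.2⟩, ?_⟩
    rw [Bool.and_eq_true]
    constructor
    · rw [PySem.Set.issubset_iff]
      exact fun x hx => (List.mem_filter.mp (htf hx)).1
    · rw [Bool.not_eq_true', ← Bool.not_eq_true]
      intro hst
      exact hit ((PySem.Set.issubset_iff _ _).mp hst i hi)
  · rintro ⟨u, hu, hub⟩
    rw [List.mem_filter] at hu
    rw [Bool.and_eq_true] at hub
    have hus : u ⊆ s := (PySem.Set.issubset_iff _ _).mp hub.1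
    have hsu : ¬ s ⊆ u := fun h => by
      have hx := (PySem.Set.issubset_iff s u).mpr h
      rw [hx] at hub; simp at hub
    have hex : ∃ i, i ∈ s ∧ i ∉ u := by
      by_contra hc
      push Not at hc
      exact hsu (fun x hx => hc x hx)
    obtain ⟨i, hi, hiu⟩ := hex
    refine ⟨i, hi, ?_⟩
    unfold pvG
    rw [List.any_eq_true]
    refine ⟨u, hu.1, ?_⟩
    rw [Bool.and_eq_true]
    refine ⟨?_, hu.2⟩
    rw [PySem.Set.issubset_iff]
    intro x hx
    rw [List.mem_filter]
    refine ⟨hus hx, ?_⟩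
    simp only [bne_iff_ne, ne_eq]
    exact fun he => hiu (he ▸ hx)

-- the DP sweep computes count of good subsets and the canonical dict
theorem pv_fold_aux (relation : List (List String)) (n : Nat) :
    ∀ (rest pre : List (List Int)) (c : Int), pvAllSubsets n = pre ++ rest →
      rest.foldl (pvStepB relation) (pvDictOf relation n pre, c)
        = (pvDictOf relation n (pre ++ rest),
           c + ((rest.filter (pvGood relation n)).length : Int)) := by
  intro rest
  induction rest with
  | nil =>
    intro pre c hL
    simp
  | cons s rest ih =>
    intro pre c hL
    have hsL : s ∈ pvAllSubsets n := by
      rw [hL]; exact List.mem_append_right _ (List.mem_cons_self)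
    have hpre : ∀ i ∈ s, s.filter (fun c => c != i) ∈ pre := by
      intro i hi
      have hmem : s.filter (fun c => c != i) ∈ pvAllSubsets n :=
        pv_filter_ne_mem_allSubsets hsL i
      have hlt := pv_filter_ne_length_lt hi
      rw [hL, List.mem_append] at hmem
      rcases hmem with h | h
      · exact h
      · exfalso
        have hpw := pv_allSubsets_pairwise_len n
        rw [hL] at hpw
        have h2 := (List.pairwise_append.mp hpw).2.1
        rw [List.pairwise_cons] at h2
        rcases List.mem_cons.mp h with he | h
        · rw [he] at hlt; omega
        · have := h2.1 _ h
          omega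
    have hsub : (s.any (fun i =>
        PySem.Dict.getD (pvDictOf relation n pre) (s.filter (fun c => c != i)) false))
        = pvDrop relation n s := by
      unfold pvDrop
      apply PySem.List.any_congr_mem
      intro i hi
      rw [pv_getD_dictOf, if_pos (hpre i hi)]
    have hstep : pvStepB relation (pvDictOf relation n pre, c) s
        = (pvDictOf relation n (pre ++ [s]),
           c + if pvGood relation n s then 1 else 0) := by
      unfold pvStepB
      simp only [hsub]
      refine Prod.ext ?_ ?_
      · show PySem.Dict.insert (pvDictOf relation n pre) s
            (pvIsUniqueB relation s || pvDrop relation n s) = _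
        rw [pv_g_step relation hsL]
        unfold pvDictOf
        rw [List.foldl_append, List.foldl_cons, List.foldl_nil]
      · show (if pvIsUniqueB relation s && !pvDrop relation n s then c + 1 else c) = _
        unfold pvGood
        cases h : (pvIsUniqueB relation s && !pvDrop relation n s) <;> simp
    rw [List.foldl_cons, hstep, ih (pre ++ [s]) _ (by rw [hL, List.append_assoc]; rfl)]
    rw [List.append_assoc]
    refine Prod.ext ?_ ?_
    · rfl
    · show _ = c + ((List.filter (pvGood relation n) (s :: rest)).length : Int)
      rw [List.filter_cons]
      cases h : pvGood relation n s <;> simp [Int.add_comm, Int.add_left_comm]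

theorem pv_main (relation : List (List String)) : solution relation = solution_alt relation := by
  rw [pv_A_eq]
  simp only [solution_alt]
  set n := (PySem.List.pyGetD relation 0 []).length with hn
  rw [← List.foldl_flatMap]
  rw [show ((List.range (n + 1)).flatMap
      (fun r => PySem.List.combinations (PySem.List.pyRange 0 (n : Int) 1) r)) = pvAllSubsets n
    from rfl]
  have h0 : (pvDictOf relation n [], (0 : Int)) =
      ((PySem.Dict.empty : PySem.Dict (List Int) Bool), (0 : Int)) := rfl
  rw [← h0, pv_fold_aux relation n (pvAllSubsets n) [] 0 (by rw [List.nil_append])]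
  simp only [zero_add]
  rw [List.filter_filter]
  congr 2
  apply List.filter_congr
  intro a ha
  unfold pvGood
  rw [pv_drop_any relation]
  unfold pvMinB
  exact Bool.and_comm _ _

-- ===== VERDICT (by name: the statement is the Claim_ definition above) =====
theorem solution_spec : Claim_equal_solution := by
  intro relation _ _
  unfold Spec_solution
  exact pv_main relation
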